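-- pv_equiv track=rewrite | github.com/sum1tbarua/Python-Projects | lesson06_sales_ranking_analyzer/utilities.py | top_product
-- ===== SOURCE A (Python) =====
-- def top_product(data):
--     top_product_dict = dict()
--     top_product_name = None
--     top_earning_product = 0
--
--     for name, product, price in data:
--         top_product_dict[product] = top_product_dict.get(product, 0) + price
--
--     for key, value in top_product_dict.items():
--         if value > top_earning_product:
--             top_earning_product = value
--             top_product_name = key
--
--     return top_product_name
-- ===== SOURCE B (Python) =====
-- def top_product(data):
--     totals = {}
--     for _name, product, price in data:
--         totals[product] = totals.get(product, 0) + price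
--     ranked = sorted(totals.items(), key=lambda kv: -kv[1])
--     if ranked and ranked[0][1] > 0:
--         return ranked[0][0]
--     return None
-- ===== Notes on version B (the rewrite author's own statement) =====
-- stated objective: alternative
-- what changed: Replaces A's manual running-strict-max scan over the aggregated totals with building a full ranking (stable sort by negated total) and taking its head, guarded by the same >0 threshold; the stable sort preserves A's first-wins tie-break.
import Mathlib
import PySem

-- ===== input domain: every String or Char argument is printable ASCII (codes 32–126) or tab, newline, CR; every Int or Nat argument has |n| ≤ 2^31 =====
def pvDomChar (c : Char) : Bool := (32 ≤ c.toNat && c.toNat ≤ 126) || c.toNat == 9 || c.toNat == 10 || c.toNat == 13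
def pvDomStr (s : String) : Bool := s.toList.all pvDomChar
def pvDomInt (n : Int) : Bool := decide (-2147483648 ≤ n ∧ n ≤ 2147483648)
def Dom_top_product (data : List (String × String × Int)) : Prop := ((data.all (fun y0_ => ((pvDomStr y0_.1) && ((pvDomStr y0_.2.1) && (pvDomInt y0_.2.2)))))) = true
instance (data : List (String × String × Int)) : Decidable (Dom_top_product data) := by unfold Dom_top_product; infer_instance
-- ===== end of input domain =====

-- B replaces A's running-strict-max scan over the totals with a stable ranking
-- (sorted by negated total) whose head is taken under the same >0 threshold; same cost class.

-- ===== PORT A =====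
def top_product (data : List (String × String × Int)) : Option String :=
  let d := data.foldl (fun d y => d.insert y.2.1 (d.getD y.2.1 0 + y.2.2))
    (PySem.Dict.empty : PySem.Dict String Int)
  (d.items.foldl (fun (st : Option String × Int) kv =>
      if kv.2 > st.2 then (some kv.1, kv.2) else st) (none, 0)).1

-- ===== PORT B =====
def top_product_alt (data : List (String × String × Int)) : Option String :=
  let totals := data.foldl (fun d y => d.insert y.2.1 (d.getD y.2.1 0 + y.2.2))
    (PySem.Dict.empty : PySem.Dict String Int)
  let ranked := PySem.List.sorted totals.items (fun kv => -kv.2) false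
  match ranked with
  | [] => none
  | (k, v) :: _ => if v > 0 then some k else none

-- ===== PRECONDITION & SPEC =====
def Spec_top_product (data : List (String × String × Int)) (out : Option String) : Prop := out = top_product_alt data
instance (data : List (String × String × Int)) (out : Option String) : Decidable (Spec_top_product data out) := by unfold Spec_top_product; infer_instance

-- ===== CLAIM (what is proved, stated in full; the proofs are below) =====
def Claim_equal_top_product : Prop := ∀ (data : List (String × String × Int)), Dom_top_product data → Spec_top_product data (top_product data)

-- ===== LEMMAS AND PROOFS =====

-- "first element attaining the maximal total", as a left fold
def pvFM (st : Option (String × Int)) (kv : String × Int) : Option (String × Int) :=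
  match st with
  | none => some kv
  | some s => if kv.2 > s.2 then some kv else s

-- relation between A's scan state and the pvFM state
def pvRel (p : Option String × Int) (st : Option (String × Int)) : Prop :=
  match st with
  | none => p.1 = none ∧ p.2 = 0
  | some s => if s.2 > 0 then p.1 = some s.1 ∧ p.2 = s.2 else p.1 = none ∧ p.2 = 0

theorem head?_insertBy {α : Type} (before : α → α → Bool) (x : α) (ys : List α) :
    (PySem.List.insertBy before x ys).head? =
      some (match ys.head? with | none => x | some y => if before x y then x else y) := by
  cases ys with
  | nil => simp [PySem.List.insertBy]
  | cons y ys => by_cases h : before x y <;> simp [PySem.List.insertBy, h]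

theorem head?_foldl_insertBy (l : List (String × Int)) :
    (l.foldl (fun acc x =>
        PySem.List.insertBy (fun a b => decide ((-a.2 : Int) < -b.2)) x acc) []).head?
      = l.foldl pvFM none := by
  induction l using List.reverseRecOn with
  | nil => simp
  | append_singleton l x ih =>
    rw [List.foldl_append, List.foldl_append]
    simp only [List.foldl_cons, List.foldl_nil]
    rw [head?_insertBy, ih]
    cases hs : l.foldl pvFM none with
    | none => simp [pvFM]
    | some s =>
      simp only [pvFM]
      by_cases h : x.2 > s.2
      · have : ((-x.2 : Int) < -s.2) := by omega
        simp [h, this]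
      · have : ¬ ((-x.2 : Int) < -s.2) := by omega
        simp [h, this]

theorem scan_rel (l : List (String × Int)) :
    ∀ (p : Option String × Int) (st : Option (String × Int)), pvRel p st →
      pvRel (l.foldl (fun (st : Option String × Int) kv =>
          if kv.2 > st.2 then (some kv.1, kv.2) else st) p) (l.foldl pvFM st) := by
  induction l with
  | nil => intro p st h; exact h
  | cons kv t ih =>
    intro p st h
    simp only [List.foldl_cons]
    apply ih
    cases st with
    | none =>
      obtain ⟨h1, h2⟩ := h
      simp only [pvFM, pvRel]
      by_cases hv : kv.2 > 0
      · simp [h2, hv]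
      · simp [h1, h2, hv]
    | some s =>
      simp only [pvRel] at h
      by_cases hs : s.2 > 0
      · rw [if_pos hs] at h
        obtain ⟨h1, h2⟩ := h
        simp only [pvFM, pvRel]
        by_cases hv : kv.2 > s.2
        · have : kv.2 > 0 := by omega
          simp [h2, hv, this]
        · simp [h1, h2, hv, hs]
      · rw [if_neg hs] at h
        obtain ⟨h1, h2⟩ := h
        simp only [pvFM, pvRel]
        by_cases hv : kv.2 > s.2
        · by_cases hv0 : kv.2 > 0 <;> simp [h1, h2, hv, hv0]
        · have : ¬ kv.2 > 0 := by omega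
          simp [h1, h2, hv, hs, this]

-- ===== VERDICT (by name: the statement is the Claim_ definition above) =====
theorem top_product_spec : Claim_equal_top_product := by
  unfold Claim_equal_top_product
  intro data _
  unfold Spec_top_product top_product top_product_alt
  simp only []
  generalize (data.foldl (fun d y => d.insert y.2.1 (d.getD y.2.1 0 + y.2.2))
    (PySem.Dict.empty : PySem.Dict String Int)).items = l
  rw [PySem.List.sorted_eq_foldl_insertBy]
  have h2 := scan_rel l (none, 0) none ⟨rfl, rfl⟩
  have h1 := head?_foldl_insertBy l
  cases hs : l.foldl pvFM none with
  | none =>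
    rw [hs] at h1 h2
    have : (l.foldl (fun acc x =>
        PySem.List.insertBy (fun a b => decide ((-a.2 : Int) < -b.2)) x acc) []) = [] :=
      List.head?_eq_none_iff.mp h1
    rw [this]
    exact h2.1
  | some s =>
    rw [hs] at h1 h2
    obtain ⟨t, ht⟩ := List.head?_eq_some_iff.mp h1
    rw [ht]
    simp only [pvRel] at h2
    by_cases hv : s.2 > 0
    · rw [if_pos hv] at h2
      simp [hv, h2.1]
    · rw [if_neg hv] at h2
      simp [hv, h2.1]
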